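-- pv_equiv track=rewrite | github.com/60jong/ProblemSolving | pyps/solved_ac/BOJ/투포인터/주사위고르기.py | solution
-- ===== SOURCE A (Python) =====
-- from itertools import combinations as cmb, product
-- from collections import defaultdict
-- import math
--
-- def remain_cmb(N, cmb):
--     cmb_set = set(cmb)
--
--     remain = []
--     for n in range(N):
--         if n not in cmb_set:
--             remain.append(n)
--
--     return tuple(remain)
--
-- def solution(dice):
--     N = len(dice)
--     combs = math.comb(N, N // 2)
--     max_wins = 0
--     max_comb = ()
--
--     comb_count = 0
--     # (10 C 5) * (6 ** 5 + 500 * 2)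
--     for c in cmb(range(N), N // 2):
--         comb_count += 1
--
--         rc = remain_cmb(N, c)
--
--         count_c, count_rc = defaultdict(int), defaultdict(int)
--         for p in product(*list(map(lambda x: dice[x], c))):
--             count_c[sum(p)] += 1
--         for p in product(*list(map(lambda x: dice[x], rc))):
--             count_rc[sum(p)] += 1
--
--         c_keys, rc_keys = sorted(list(count_c.keys())), sorted(list(count_rc.keys()))
--
--         # 투 포인터로 승수 계산
--         ci, ri = 0, 0
--         wins, cumul = 0, 0
--         while ci < len(c_keys):
--             while ri < len(rc_keys) and rc_keys[ri] < c_keys[ci]: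
--                 cumul += count_rc[rc_keys[ri]]
--                 ri += 1
--             wins += count_c[c_keys[ci]] * cumul
--             ci += 1
--
--         if max_wins < wins:
--             max_wins = wins
--             max_comb = tuple(map(lambda x: x + 1, c))
--
--     return sorted(list(max_comb))
-- ===== SOURCE B (Python) =====
-- from itertools import combinations
--
--
-- def conv_dist(faces_lists):
--     # distribution of sums, built by convolving one die at a time
--     dist = {0: 1}
--     for faces in faces_lists:
--         new = {}
--         for s, cnt in dist.items():
--             for f in faces:
--                 k = s + f
--                 new[k] = new.get(k, 0) + cnt
--         dist = new
--     return dist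
--
--
-- def solution(dice):
--     N = len(dice)
--     best_wins = 0
--     best = ()
--     for c in combinations(range(N), N // 2):
--         rc = [i for i in range(N) if i not in c]
--         dist_c = conv_dist([dice[i] for i in c])
--         dist_rc = conv_dist([dice[i] for i in rc])
--         # walk both distributions from the largest sum down; 'suffix' is the
--         # total count of chosen-group sums strictly above the current rc sum
--         rest = sorted(dist_c.items(), key=lambda kv: kv[0], reverse=True)
--         wins = 0
--         suffix = 0
--         for t, rv in sorted(dist_rc.items(), key=lambda kv: kv[0], reverse=True):
--             while rest and rest[0][0] > t:
--                 suffix += rest[0][1]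
--                 rest = rest[1:]
--             wins += rv * suffix
--         if best_wins < wins:
--             best_wins = wins
--             best = c
--     return sorted(x + 1 for x in best)
-- ===== Notes on version B (the rewrite author's own statement) =====
-- stated objective: alternative
-- what changed: B builds each group's sum distribution by convolving per-die face counts in a dict instead of enumerating the full Cartesian product of face tuples, lists the remaining dice with a filter instead of a set-based loop, and counts winning pairs by a descending merge of the two sorted distributions instead of an ascending index-based two-pointer; this is asymptotically faster when sums collide (small face values) but not on arbitrary 2^31-sized faces.
import Mathlib
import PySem

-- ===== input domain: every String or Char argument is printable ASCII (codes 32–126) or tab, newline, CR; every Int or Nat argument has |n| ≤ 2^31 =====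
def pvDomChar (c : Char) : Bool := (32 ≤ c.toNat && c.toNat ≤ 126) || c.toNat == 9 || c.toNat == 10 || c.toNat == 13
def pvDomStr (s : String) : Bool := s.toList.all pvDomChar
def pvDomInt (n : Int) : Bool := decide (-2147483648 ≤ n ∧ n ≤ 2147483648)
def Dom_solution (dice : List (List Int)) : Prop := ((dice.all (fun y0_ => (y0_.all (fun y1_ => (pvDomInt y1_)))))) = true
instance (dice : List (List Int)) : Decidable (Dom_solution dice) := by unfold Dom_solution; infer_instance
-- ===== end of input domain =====

-- B replaces A's per-combination Cartesian-product enumeration of face tuples by a convolution of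
-- per-die sum distributions, and counts winning pairs by a descending merge over the two
-- distributions instead of A's ascending index-based two-pointer (alternative algorithm, same result).

-- ===== PORT A =====

-- itertools.combinations(xs, k), lexicographic order (both Pythons call this same library function)
def pyCombinations (k : Nat) (xs : List Int) : List (List Int) :=
  match k, xs with
  | 0, _ => [[]]
  | _ + 1, [] => []
  | k + 1, x :: rest => (pyCombinations k rest).map (fun c => x :: c) ++ pyCombinations (k + 1) rest

-- itertools.product(*lists)
def pyProduct : List (List Int) → List (List Int)
  | [] => [[]]
  | d :: rest => d.flatMap (fun f => (pyProduct rest).map (fun p => f :: p))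

-- remain_cmb(N, cmb)
def remainCmb (N : Int) (cmb : List Int) : List Int :=
  let cmbSet := PySem.Set.ofList cmb
  (PySem.List.pyRange 0 N 1).foldl
    (fun remain n => if PySem.Set.contains cmbSet n then remain else remain ++ [n]) []

-- "for p in product(...): count[sum(p)] += 1"   (defaultdict(int))
def countSums (ls : List (List Int)) : PySem.Dict Int Int :=
  (pyProduct ls).foldl (fun d p => d.modify p.sum 0 (· + 1)) PySem.Dict.empty

-- inner "while ri < len(rc_keys) and rc_keys[ri] < c_keys[ci]"
def tpInner (rcKeys : List Int) (cntR : PySem.Dict Int Int) (ck : Int) (ri : Nat) (cumul : Int) :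
    Nat × Int :=
  if h : ri < rcKeys.length then
    if rcKeys[ri] < ck then
      tpInner rcKeys cntR ck (ri + 1) (cumul + cntR.getD rcKeys[ri] 0)
    else (ri, cumul)
  else (ri, cumul)
termination_by rcKeys.length - ri

-- outer "while ci < len(c_keys)"
def tpOuter (cKeys rcKeys : List Int) (cntC cntR : PySem.Dict Int Int) (ci ri : Nat)
    (wins cumul : Int) : Int :=
  if h : ci < cKeys.length then
    let p := tpInner rcKeys cntR cKeys[ci] ri cumul
    tpOuter cKeys rcKeys cntC cntR (ci + 1) p.1 (wins + cntC.getD cKeys[ci] 0 * p.2) p.2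
  else wins
termination_by cKeys.length - ci

def solution (dice : List (List Int)) : List Int :=
  let N : Int := (dice.length : Int)
  -- math.comb(N, N // 2); N ≥ 0 so N // 2 is dice.length / 2 on Nat
  let _combs : Int := (Nat.choose dice.length (dice.length / 2) : Int)
  let st :=
    (pyCombinations (dice.length / 2) (PySem.List.pyRange 0 N 1)).foldl
      (fun (st : Int × Int × List Int) c =>
        let combCount := st.1 + 1
        let rc := remainCmb N c
        -- dice[x]: every x drawn from range(N), always in range
        let countC := countSums (c.map (fun x => PySem.List.pyGetD dice x []))
        let countRC := countSums (rc.map (fun x => PySem.List.pyGetD dice x []))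
        let cKeys := PySem.List.sorted countC.keys (fun k => k) false
        let rcKeys := PySem.List.sorted countRC.keys (fun k => k) false
        let wins := tpOuter cKeys rcKeys countC countRC 0 0 0 0
        if st.2.1 < wins then (combCount, wins, c.map (fun x => x + 1))
        else (combCount, st.2.1, st.2.2))
      (0, 0, [])
  PySem.List.sorted st.2.2 (fun k => k) false

-- ===== PORT B =====

-- conv_dist: fold the dice in, one convolution step per die
def convStep (dist : PySem.Dict Int Int) (faces : List Int) : PySem.Dict Int Int :=
  dist.items.foldl
    (fun new p =>
      faces.foldl (fun new f => new.insert (p.1 + f) (new.getD (p.1 + f) 0 + p.2)) new)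
    PySem.Dict.empty

def convDist (facesLists : List (List Int)) : PySem.Dict Int Int :=
  facesLists.foldl convStep (PySem.Dict.empty.insert 0 1)

-- "while rest and rest[0][0] > t: suffix += rest[0][1]; rest = rest[1:]"
def consumeAbove (t : Int) : List (Int × Int) → Int → List (Int × Int) × Int
  | [], suffix => ([], suffix)
  | p :: rest, suffix => if p.1 > t then consumeAbove t rest (suffix + p.2) else (p :: rest, suffix)

-- "for t, rv in sorted(dist_rc.items(), key=..., reverse=True): ..."
def scanDesc : List (Int × Int) → List (Int × Int) → Int → Int → Int
  | [], _, wins, _ => wins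
  | (t, rv) :: rs, rest, wins, suffix =>
    let q := consumeAbove t rest suffix
    scanDesc rs q.1 (wins + rv * q.2) q.2

def solution_alt (dice : List (List Int)) : List Int :=
  let N : Int := (dice.length : Int)
  let st :=
    (pyCombinations (dice.length / 2) (PySem.List.pyRange 0 N 1)).foldl
      (fun (st : Int × List Int) c =>
        let rc := (PySem.List.pyRange 0 N 1).filter (fun i => !(c.contains i))
        -- dice[i]: every i drawn from range(N), always in range
        let distC := convDist (c.map (fun i => PySem.List.pyGetD dice i []))
        let distRC := convDist (rc.map (fun i => PySem.List.pyGetD dice i []))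
        let rest := PySem.List.sorted distC.items (fun kv => kv.1) true
        let wins := scanDesc (PySem.List.sorted distRC.items (fun kv => kv.1) true) rest 0 0
        if st.1 < wins then (wins, c) else (st.1, st.2))
      (0, [])
  PySem.List.sorted (st.2.map (fun x => x + 1)) (fun k => k) false

-- ===== PRECONDITION & SPEC =====
def Spec_solution (dice : List (List Int)) (out : List Int) : Prop := out = solution_alt dice
instance (dice : List (List Int)) (out : List Int) : Decidable (Spec_solution dice out) := by unfold Spec_solution; infer_instance

-- ===== CLAIM (what is proved, stated in full; the proofs are below) =====
def Claim_equal_solution : Prop := ∀ (dice : List (List Int)), Dom_solution dice → Spec_solution dice (solution dice)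

-- ===== LEMMAS AND PROOFS =====

-- number of face tuples drawn from ls whose sum is v (the quantity both programs count)
def msum (ls : List (List Int)) (v : Int) : Int := (((pyProduct ls).map List.sum).count v : Int)

-- ---- A's counting dict ----

theorem countSums_eq_counter (ls : List (List Int)) :
    countSums ls = PySem.Dict.counter ((pyProduct ls).map List.sum) := by
  rw [PySem.Dict.counter_eq_foldl, List.foldl_map]
  rfl

theorem getD_countSums (ls : List (List Int)) (v : Int) :
    (countSums ls).getD v 0 = msum ls v := by
  rw [countSums_eq_counter, PySem.Dict.getD_counter, msum]

theorem nodup_keys_countSums (ls : List (List Int)) : (countSums ls).keys.Nodup := by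
  rw [countSums_eq_counter]; exact PySem.Dict.nodup_keys_counter _

theorem mem_keys_countSums (ls : List (List Int)) (v : Int) :
    v ∈ (countSums ls).keys ↔ msum ls v ≠ 0 := by
  rw [countSums_eq_counter, PySem.Dict.keys_counter, PySem.Set.mem_ofList, msum]
  rw [← List.count_pos_iff]
  omega

-- ---- generic list sums ----

theorem sum_sum_swap {α β : Type} (xs : List α) (ys : List β) (h : α → β → Int) :
    (xs.map (fun x => (ys.map (h x)).sum)).sum
      = (ys.map (fun y => (xs.map (fun x => h x y)).sum)).sum := by
  induction xs with
  | nil => simp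
  | cons x xs ih =>
    simp only [List.map_cons, List.sum_cons, ih, ← PySem.List.sum_map_add_int]

theorem sum_map_filter_eq_sum_ite {α : Type} (l : List α) (p : α → Bool) (f : α → Int) :
    ((l.filter p).map f).sum = (l.map (fun x => if p x then f x else 0)).sum := by
  induction l with
  | nil => rfl
  | cons x l ih =>
    by_cases h : p x <;> simp [h, ih]

theorem sum_map_nonneg_ne_zero {α : Type} (l : List α) (f : α → Int)
    (h : ∀ x ∈ l, 0 ≤ f x) : (l.map f).sum ≠ 0 ↔ ∃ x ∈ l, f x ≠ 0 := by
  induction l with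
  | nil => simp
  | cons x l ih =>
    have hx := h x (by simp)
    have hrest : 0 ≤ (l.map f).sum := List.sum_nonneg (by
      intro y hy
      obtain ⟨z, hz, rfl⟩ := List.mem_map.mp hy
      exact h z (by simp [hz]))
    rw [List.map_cons, List.sum_cons]
    constructor
    · intro hne
      by_cases hfx : f x = 0
      · rw [hfx, zero_add] at hne
        obtain ⟨z, hz, hzne⟩ := (ih (fun z hz => h z (by simp [hz]))).mp hne
        exact ⟨z, by simp [hz], hzne⟩
      · exact ⟨x, by simp, hfx⟩
    · rintro ⟨z, hz, hzne⟩
      rcases List.mem_cons.mp hz with rfl | hz'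
      · have : 0 < f z := lt_of_le_of_ne hx (Ne.symm hzne)
        omega
      · have : (l.map f).sum ≠ 0 :=
          (ih (fun z hz => h z (by simp [hz]))).mpr ⟨z, hz', hzne⟩
        have : 0 < (l.map f).sum := lt_of_le_of_ne hrest (Ne.symm this)
        omega

theorem sum_map_indicator {α : Type} [DecidableEq α] (K : List α) (hnd : K.Nodup) (v : α)
    (c : α → Int) :
    (K.map (fun k => if k = v then c k else 0)).sum = if v ∈ K then c v else 0 := by
  induction K with
  | nil => simp
  | cons k K ih =>
    rcases List.nodup_cons.mp hnd with ⟨hk, hnd'⟩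
    by_cases h : k = v
    · subst h
      have : (K.map (fun j => if j = k then c j else 0)).sum = 0 := by
        apply List.sum_eq_zero
        intro y hy
        obtain ⟨z, hz, rfl⟩ := List.mem_map.mp hy
        have : z ≠ k := fun e => hk (e ▸ hz)
        simp [this]
      simp [this]
    · simp only [List.map_cons, List.sum_cons, if_neg h, zero_add, ih hnd', List.mem_cons]
      have : ¬ v = k := fun e => h e.symm
      simp [this]

theorem sum_mul_filter_swap (cs rs : List Int) (f g : Int → Int) :
    (cs.map (fun s => f s * ((rs.filter (fun t => decide (t < s))).map g).sum)).sum
      = (rs.map (fun t => g t * ((cs.filter (fun s => decide (t < s))).map f).sum)).sum := by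
  have lhs : ∀ s, f s * ((rs.filter (fun t => decide (t < s))).map g).sum
      = (rs.map (fun t => if decide (t < s) then f s * g t else 0)).sum := by
    intro s
    rw [sum_map_filter_eq_sum_ite, ← List.sum_map_mul_left]
    congr 1
    apply List.map_congr_left
    intro t _
    by_cases h : t < s <;> simp [h]
  have rhs : ∀ t, g t * ((cs.filter (fun s => decide (t < s))).map f).sum
      = (cs.map (fun s => if decide (t < s) then f s * g t else 0)).sum := by
    intro t
    rw [sum_map_filter_eq_sum_ite, ← List.sum_map_mul_left]
    congr 1
    apply List.map_congr_left
    intro s _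
    by_cases h : t < s <;> simp [h, mul_comm]
  simp only [lhs, rhs]
  exact sum_sum_swap cs rs _

-- ---- msum recurrences ----

theorem msum_nonneg (ls : List (List Int)) (v : Int) : 0 ≤ msum ls v := Int.natCast_nonneg _

theorem msum_nil (v : Int) : msum [] v = if v = 0 then 1 else 0 := by
  unfold msum pyProduct
  by_cases h : v = 0 <;> simp [h, eq_comm]

theorem msum_cons (d : List Int) (ls : List (List Int)) (v : Int) :
    msum (d :: ls) v = (d.map (fun f => msum ls (v - f))).sum := by
  unfold msum
  rw [show pyProduct (d :: ls) = d.flatMap (fun f => (pyProduct ls).map (fun p => f :: p)) from rfl]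
  rw [List.map_flatMap]
  rw [List.count_flatMap, Nat.cast_list_sum]
  congr 1
  rw [List.map_map]
  apply List.map_congr_left
  intro f _
  simp only [Function.comp, List.map_map]
  congr 1
  rw [List.count, List.count, List.countP_map, List.countP_map]
  apply List.countP_congr
  intro p _
  simp only [Function.comp, List.sum_cons, beq_iff_eq]
  constructor
  · intro h; omega
  · intro h; omega

theorem msum_append_singleton (ls : List (List Int)) (d : List Int) (v : Int) :
    msum (ls ++ [d]) v = (d.map (fun g => msum ls (v - g))).sum := by
  induction ls generalizing v with
  | nil => rw [List.nil_append, msum_cons]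
  | cons x ls ih =>
    rw [List.cons_append]
    simp only [msum_cons, ih]
    rw [sum_sum_swap x d (fun f g => msum ls (v - f - g))]
    congr 1
    apply List.map_congr_left
    intro g _
    congr 1
    apply List.map_congr_left
    intro f _
    congr 1
    omega

-- ---- B's convolution dict ----

theorem foldl_foldl_eq_foldl_flatMap {α β γ : Type} (l : List α) (g : α → List β)
    (f : γ → β → γ) (i : γ) :
    l.foldl (fun acc x => (g x).foldl f acc) i = (l.flatMap g).foldl f i := by
  induction l generalizing i with
  | nil => rfl
  | cons x l ih => simp [List.foldl_append, ih]

theorem getD_foldl_insert_add (l : List (Int × Int)) (d : PySem.Dict Int Int) (v : Int) :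
    (l.foldl (fun d q => d.insert q.1 (d.getD q.1 0 + q.2)) d).getD v 0
      = d.getD v 0 + ((l.filter (fun q => q.1 == v)).map (fun q => q.2)).sum := by
  induction l generalizing d with
  | nil => simp
  | cons q l ih =>
    rw [List.foldl_cons, ih]
    by_cases h : q.1 = v
    · rw [List.filter_cons_of_pos (by simpa using h), List.map_cons, List.sum_cons, ← h,
        PySem.Dict.getD_insert_self]
      ring
    · rw [List.filter_cons_of_neg (by simpa using h),
        PySem.Dict.getD_insert_of_ne _ _ _ (fun e => h e.symm)]

theorem getD_of_not_mem_keys (d : PySem.Dict Int Int) (v : Int) (h : v ∉ d.keys) :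
    d.getD v 0 = 0 := by
  have : d.get? v = none := (PySem.Dict.get?_eq_none_iff_not_mem_keys d v).mpr h
  simp [PySem.Dict.getD, this]

theorem convStep_eq_flat (dist : PySem.Dict Int Int) (faces : List Int) :
    convStep dist faces
      = (dist.items.flatMap (fun p => faces.map (fun f => (p.1 + f, p.2)))).foldl
          (fun new q => new.insert q.1 (new.getD q.1 0 + q.2)) PySem.Dict.empty := by
  unfold convStep
  rw [← foldl_foldl_eq_foldl_flatMap]
  congr 1
  funext new p
  rw [List.foldl_map]

theorem sum_flatMap' {α β : Type} (l : List α) (g : α → List β) (f : β → Int) :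
    ((l.flatMap g).map f).sum = (l.map (fun x => ((g x).map f).sum)).sum := by
  induction l with
  | nil => rfl
  | cons x l ih => simp [List.flatMap_cons, ih]

theorem getD_convStep (dist : PySem.Dict Int Int) (faces : List Int) (v : Int)
    (hnd : dist.keys.Nodup) :
    (convStep dist faces).getD v 0 = (faces.map (fun f => dist.getD (v - f) 0)).sum := by
  have hkeys : dist.keys.Nodup := hnd
  rw [convStep_eq_flat, getD_foldl_insert_add, PySem.Dict.getD_empty, zero_add]
  rw [List.filter_flatMap, sum_flatMap']
  have inner : ∀ p : Int × Int,
      ((((faces.map (fun f => (p.1 + f, p.2))).filter (fun q => q.1 == v)).map (fun q => q.2)).sum)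
        = (faces.map (fun f => if p.1 + f = v then p.2 else 0)).sum := by
    intro p
    rw [List.filter_map, List.map_map, sum_map_filter_eq_sum_ite]
    apply congrArg List.sum
    apply List.map_congr_left
    intro f _
    simp [Function.comp]
  simp only [inner]
  rw [PySem.Dict.items_eq_map_keys dist hnd 0, List.map_map]
  have step1 : (dist.keys.map ((fun p : Int × Int =>
        (faces.map (fun f => if p.1 + f = v then p.2 else 0)).sum) ∘ fun k => (k, dist.getD k 0))).sum
      = (dist.keys.map (fun k => (faces.map (fun f => if k + f = v then dist.getD k 0 else 0)).sum)).sum := rfl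
  rw [step1]
  rw [sum_sum_swap dist.keys faces (fun k f => if k + f = v then dist.getD k 0 else 0)]
  apply congrArg List.sum
  apply List.map_congr_left
  intro f _
  have cond : ∀ k : Int, (if k + f = v then dist.getD k 0 else 0) = (if k = v - f then dist.getD k 0 else 0) := by
    intro k
    by_cases h : k + f = v
    · rw [if_pos h, if_pos (by omega)]
    · rw [if_neg h, if_neg (by omega)]
  simp only [cond]
  rw [sum_map_indicator dist.keys hkeys (v - f) (fun k => dist.getD k 0)]
  by_cases hm : v - f ∈ dist.keys
  · rw [if_pos hm]
  · rw [if_neg hm, getD_of_not_mem_keys _ _ hm]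

theorem nodup_keys_convStep (dist : PySem.Dict Int Int) (faces : List Int) :
    (convStep dist faces).keys.Nodup := by
  rw [convStep_eq_flat]
  have h := PySem.Dict.nodup_keys_foldl_insert_key
    (dist.items.flatMap (fun p => faces.map (fun f => (p.1 + f, p.2))))
    (fun q : Int × Int => q.1) (fun (d : PySem.Dict Int Int) (q : Int × Int) => d.getD q.1 0 + q.2)
    PySem.Dict.empty (by rw [PySem.Dict.keys_empty]; exact List.nodup_nil)
  simpa using h

theorem mem_keys_convStep (dist : PySem.Dict Int Int) (faces : List Int) (v : Int)
    (hnd : dist.keys.Nodup) :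
    v ∈ (convStep dist faces).keys ↔ ∃ k ∈ dist.keys, ∃ f ∈ faces, k + f = v := by
  rw [convStep_eq_flat]
  have hk := PySem.Dict.keys_foldl_insert_key
    (dist.items.flatMap (fun p => faces.map (fun f => (p.1 + f, p.2))))
    (fun q : Int × Int => q.1) (fun (d : PySem.Dict Int Int) (q : Int × Int) => d.getD q.1 0 + q.2)
    PySem.Dict.empty
  simp only [PySem.Dict.keys_empty] at hk
  rw [hk]
  rw [show PySem.Set.update ([] : List Int)
      ((dist.items.flatMap (fun p => faces.map (fun f => (p.1 + f, p.2)))).map (fun q => q.1))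
      = PySem.Set.ofList ((dist.items.flatMap (fun p => faces.map (fun f => (p.1 + f, p.2)))).map
        (fun q => q.1)) from by rw [PySem.Set.ofList_eq_foldl]; rfl]
  rw [PySem.Set.mem_ofList, List.map_flatMap]
  simp only [List.mem_flatMap, List.map_map, List.mem_map, Function.comp]
  constructor
  · rintro ⟨p, hp, f, hf, rfl⟩
    exact ⟨p.1, PySem.Dict.mem_keys_of_mem_items dist hp, f, hf, rfl⟩
  · rintro ⟨k, hk, f, hf, rfl⟩
    refine ⟨(k, dist.getD k 0), ?_, f, hf, rfl⟩
    rw [PySem.Dict.items_eq_map_keys dist hnd 0]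
    exact List.mem_map.mpr ⟨k, hk, rfl⟩

theorem conv_inv (ls : List (List Int)) :
    (∀ v, (convDist ls).getD v 0 = msum ls v) ∧ (convDist ls).keys.Nodup ∧
      (∀ v, v ∈ (convDist ls).keys ↔ msum ls v ≠ 0) := by
  induction ls using List.reverseRecOn with
  | nil =>
    refine ⟨?_, by decide, ?_⟩
    · intro v
      by_cases h : v = 0
      · subst h
        rw [show (convDist []).getD 0 0 = 1 from rfl, msum_nil]
        simp
      · rw [msum_nil, if_neg h]
        show (PySem.Dict.empty.insert 0 1).getD v 0 = 0
        rw [PySem.Dict.getD_insert_of_ne _ _ _ h, PySem.Dict.getD_empty]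
    · intro v
      rw [msum_nil]
      show v ∈ [(0 : Int)] ↔ _
      by_cases h : v = 0 <;> simp [h]
  | append_singleton ls d ih =>
    obtain ⟨ihD, ihN, ihM⟩ := ih
    have hstep : convDist (ls ++ [d]) = convStep (convDist ls) d := by
      rw [convDist, List.foldl_append]
      rfl
    refine ⟨?_, ?_, ?_⟩
    · intro v
      rw [hstep, getD_convStep _ _ _ ihN, msum_append_singleton]
      apply congrArg List.sum
      exact List.map_congr_left (fun f _ => ihD (v - f))
    · rw [hstep]; exact nodup_keys_convStep _ _
    · intro v
      rw [hstep, mem_keys_convStep _ _ _ ihN, msum_append_singleton,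
        sum_map_nonneg_ne_zero _ _ (fun f _ => msum_nonneg ls (v - f))]
      constructor
      · rintro ⟨k, hk, f, hf, rfl⟩
        refine ⟨f, hf, ?_⟩
        rw [show k + f - f = k by omega]
        exact (ihM k).mp hk
      · rintro ⟨f, hf, hne⟩
        exact ⟨v - f, (ihM (v - f)).mpr hne, f, hf, by omega⟩

-- ---- the two win-counting loops ----

theorem takeWhile_eq_filter_of_sorted (l : List Int) (c : Int)
    (h : l.Pairwise (· ≤ ·)) :
    l.takeWhile (fun t => decide (t < c)) = l.filter (fun t => decide (t < c)) := by
  induction l with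
  | nil => rfl
  | cons x l ih =>
    rcases List.pairwise_cons.mp h with ⟨hx, h'⟩
    by_cases hc : x < c
    · simp only [List.takeWhile_cons, List.filter_cons, decide_eq_true hc, if_true]
      rw [ih h']
    · have : ∀ t ∈ l, ¬ t < c := fun t ht hlt => hc (lt_of_le_of_lt (hx t ht) hlt)
      simp only [List.takeWhile_cons, List.filter_cons, decide_eq_false hc]
      rw [List.filter_eq_nil_iff.mpr (fun t ht => by simpa using this t ht)]
      simp

theorem takeWhile_eq_filter_of_sorted_desc (l : List (Int × Int)) (c : Int)
    (h : l.Pairwise (fun a b => b.1 ≤ a.1)) :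
    l.takeWhile (fun p => decide (c < p.1)) = l.filter (fun p => decide (c < p.1)) := by
  induction l with
  | nil => rfl
  | cons x l ih =>
    rcases List.pairwise_cons.mp h with ⟨hx, h'⟩
    by_cases hc : c < x.1
    · simp only [List.takeWhile_cons, List.filter_cons, decide_eq_true hc, if_true]
      rw [ih h']
    · have : ∀ p ∈ l, ¬ c < p.1 := fun p hp hlt => hc (lt_of_lt_of_le hlt (hx p hp))
      simp only [List.takeWhile_cons, List.filter_cons, decide_eq_false hc]
      rw [List.filter_eq_nil_iff.mpr (fun p hp => by simpa using this p hp)]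
      simp

theorem tpInner_spec (rs : List Int) (cntR : PySem.Dict Int Int) (ck : Int) (ri : Nat)
    (cumul : Int) :
    tpInner rs cntR ck ri cumul
      = (ri + ((rs.drop ri).takeWhile (fun t => decide (t < ck))).length,
         cumul + (((rs.drop ri).takeWhile (fun t => decide (t < ck))).map
           (fun t => cntR.getD t 0)).sum) := by
  induction ri, cumul using tpInner.induct rs cntR ck with
  | case1 ri cumul h hlt ih =>
    rw [tpInner, dif_pos h, if_pos hlt, ih, List.drop_eq_getElem_cons h]
    simp only [List.takeWhile_cons, decide_eq_true hlt, if_true, List.length_cons,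
      List.map_cons, List.sum_cons, Prod.mk.injEq]
    constructor <;> [omega; ring]
  | case2 ri cumul h hlt =>
    rw [tpInner, dif_pos h, if_neg hlt, List.drop_eq_getElem_cons h]
    simp only [List.takeWhile_cons, decide_eq_false hlt]
    simp
  | case3 ri cumul h =>
    rw [tpInner, dif_neg h, List.drop_eq_nil_of_le (by omega)]
    simp

theorem drop_takeWhile_length {α : Type} (l : List α) (p : α → Bool) :
    l.drop (l.takeWhile p).length = l.dropWhile p := by
  induction l with
  | nil => rfl
  | cons x l ih =>
    by_cases h : p x <;> simp [h, ih]

theorem tpOuter_spec_aux (cs rs : List Int) (cntC cntR : PySem.Dict Int Int) : ∀ (n ci ri : Nat)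
    (wins cumul : Int), cs.length - ci = n → (cs.drop ci).Pairwise (· ≤ ·) →
    (rs.drop ri).Pairwise (· ≤ ·) →
    tpOuter cs rs cntC cntR ci ri wins cumul
      = wins + ((cs.drop ci).map (fun s => cntC.getD s 0 *
          (cumul + (((rs.drop ri).filter (fun t => decide (t < s))).map
            (fun t => cntR.getD t 0)).sum))).sum := by
  intro n
  induction n with
  | zero =>
    intro ci ri wins cumul hn hc hr
    have h : ¬ ci < cs.length := by omega
    rw [tpOuter, dif_neg h, show cs.drop ci = [] from List.drop_eq_nil_of_le (by omega)]
    simp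
  | succ n ih =>
    intro ci ri wins cumul hn hc hr
    have h : ci < cs.length := by omega
    rw [tpOuter, dif_pos h]
    simp only [tpInner_spec]
    have hdropc : cs.drop ci = cs[ci] :: cs.drop (ci + 1) := List.drop_eq_getElem_cons h
    have hTfilter : (rs.drop ri).takeWhile (fun t => decide (t < cs[ci]))
        = (rs.drop ri).filter (fun t => decide (t < cs[ci])) :=
      takeWhile_eq_filter_of_sorted _ cs[ci] hr
    have hsplit : (rs.drop ri).takeWhile (fun t => decide (t < cs[ci]))
        ++ (rs.drop ri).dropWhile (fun t => decide (t < cs[ci])) = rs.drop ri :=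
      List.takeWhile_append_dropWhile
    have hdropr : rs.drop (ri + ((rs.drop ri).takeWhile (fun t => decide (t < cs[ci]))).length)
        = (rs.drop ri).dropWhile (fun t => decide (t < cs[ci])) := by
      rw [← List.drop_drop, drop_takeWhile_length]
    have hcs : ∀ s ∈ cs.drop (ci + 1), cs[ci] ≤ s := by
      rw [hdropc] at hc
      exact (List.pairwise_cons.mp hc).1
    rw [ih (ci + 1) _ _ _ (by omega)
      (by rw [hdropc] at hc; exact (List.pairwise_cons.mp hc).2)
      (by rw [hdropr]; exact List.Pairwise.sublist (List.dropWhile_sublist _) hr)]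
    rw [hdropr, hdropc, List.map_cons, List.sum_cons]
    have htail : ∀ s ∈ cs.drop (ci + 1),
        cntC.getD s 0 * ((cumul + (((rs.drop ri).takeWhile (fun t => decide (t < cs[ci]))).map
            (fun t => cntR.getD t 0)).sum) +
          ((((rs.drop ri).dropWhile (fun t => decide (t < cs[ci]))).filter
            (fun t => decide (t < s))).map (fun t => cntR.getD t 0)).sum)
        = cntC.getD s 0 * (cumul + (((rs.drop ri).filter (fun t => decide (t < s))).map
            (fun t => cntR.getD t 0)).sum) := by
      intro s hs
      congr 1
      have hfull : ((rs.drop ri).takeWhile (fun t => decide (t < cs[ci]))).filter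
          (fun t => decide (t < s)) = (rs.drop ri).takeWhile (fun t => decide (t < cs[ci])) := by
        apply List.filter_eq_self.mpr
        intro t ht
        have h1 : t < cs[ci] := by simpa using List.mem_takeWhile_imp ht
        have h2 : cs[ci] ≤ s := hcs s hs
        simp
        omega
      conv_rhs => rw [← hsplit]
      rw [List.filter_append, List.map_append, List.sum_append, hfull]
      ring
    rw [List.map_congr_left htail]
    rw [hTfilter]
    ring

theorem tpOuter_spec (cs rs : List Int) (cntC cntR : PySem.Dict Int Int)
    (hc : cs.Pairwise (· ≤ ·)) (hr : rs.Pairwise (· ≤ ·)) :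
    tpOuter cs rs cntC cntR 0 0 0 0
      = (cs.map (fun s => cntC.getD s 0 *
          ((rs.filter (fun t => decide (t < s))).map (fun t => cntR.getD t 0)).sum)).sum := by
  have := tpOuter_spec_aux cs rs cntC cntR (cs.length - 0) 0 0 0 0 rfl
    (by simpa using hc) (by simpa using hr)
  simpa using this

theorem consumeAbove_spec (t : Int) (rest : List (Int × Int)) (suffix : Int) :
    consumeAbove t rest suffix
      = (rest.dropWhile (fun p => decide (t < p.1)),
         suffix + ((rest.takeWhile (fun p => decide (t < p.1))).map (fun p => p.2)).sum) := by
  induction rest generalizing suffix with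
  | nil => simp [consumeAbove]
  | cons p rest ih =>
    by_cases h : p.1 > t
    · rw [consumeAbove, if_pos h, ih]
      simp only [List.dropWhile_cons, List.takeWhile_cons, decide_eq_true h, if_true,
        List.map_cons, List.sum_cons, Prod.mk.injEq]
      constructor
      · trivial
      · ring
    · rw [consumeAbove, if_neg h]
      simp only [List.dropWhile_cons, List.takeWhile_cons, decide_eq_false h]
      simp

theorem scanDesc_spec (rs : List (Int × Int)) : ∀ (rest : List (Int × Int)) (wins suffix : Int),
    rs.Pairwise (fun a b => b.1 ≤ a.1) → rest.Pairwise (fun a b => b.1 ≤ a.1) →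
    scanDesc rs rest wins suffix
      = wins + (rs.map (fun q => q.2 *
          (suffix + ((rest.filter (fun p => decide (q.1 < p.1))).map (fun p => p.2)).sum))).sum := by
  induction rs with
  | nil => intro rest wins suffix _ _; simp [scanDesc]
  | cons q rs ih =>
    intro rest wins suffix hrs hrest
    obtain ⟨t, rv⟩ := q
    rcases List.pairwise_cons.mp hrs with ⟨hq, hrs'⟩
    rw [scanDesc]
    simp only [consumeAbove_spec]
    rw [ih _ _ _ hrs' (List.Pairwise.sublist (List.dropWhile_sublist _) hrest)]
    rw [List.map_cons, List.sum_cons]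
    have hTfilter : rest.takeWhile (fun p => decide (t < p.1))
        = rest.filter (fun p => decide (t < p.1)) :=
      takeWhile_eq_filter_of_sorted_desc rest t hrest
    have hsplit : rest.takeWhile (fun p => decide (t < p.1))
        ++ rest.dropWhile (fun p => decide (t < p.1)) = rest :=
      List.takeWhile_append_dropWhile
    have htail : ∀ q' ∈ rs,
        q'.2 * ((suffix + ((rest.takeWhile (fun p => decide (t < p.1))).map (fun p => p.2)).sum) +
          (((rest.dropWhile (fun p => decide (t < p.1))).filter
            (fun p => decide (q'.1 < p.1))).map (fun p => p.2)).sum)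
        = q'.2 * (suffix + ((rest.filter (fun p => decide (q'.1 < p.1))).map (fun p => p.2)).sum) := by
      intro q' hq'
      congr 1
      have hfull : (rest.takeWhile (fun p => decide (t < p.1))).filter
          (fun p => decide (q'.1 < p.1)) = rest.takeWhile (fun p => decide (t < p.1)) := by
        apply List.filter_eq_self.mpr
        intro p hp
        have h1 : t < p.1 := by simpa using List.mem_takeWhile_imp hp
        have h2 : q'.1 ≤ t := hq q' hq'
        simp
        omega
      conv_rhs => rw [← hsplit]
      rw [List.filter_append, List.map_append, List.sum_append, hfull]
      ring
    rw [List.map_congr_left htail, hTfilter]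
    ring

-- ---- tying the two per-combination computations together ----

theorem sorted_keys_pairwise_lt (d : PySem.Dict Int Int) (hnd : d.keys.Nodup) :
    (PySem.List.sorted d.keys (fun k => k) false).Pairwise (· < ·) := by
  have hle := PySem.List.sorted_pairwise d.keys (fun k => k)
  have hne : (PySem.List.sorted d.keys (fun k => k) false).Nodup :=
    (PySem.List.sorted_perm d.keys (fun k => k) false).nodup_iff.mpr hnd
  exact (hle.and hne).imp (fun h => lt_of_le_of_ne h.1 h.2)

theorem sorted_items_desc (d : PySem.Dict Int Int) (hnd : d.keys.Nodup) :
    PySem.List.sorted d.items (fun kv => kv.1) true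
      = ((PySem.List.sorted d.keys (fun k => k) false).map (fun k => (k, d.getD k 0))).reverse := by
  apply PySem.List.sorted_rev_eq_of_perm_of_pairwise_gt
  · refine (List.reverse_perm _).trans ?_
    rw [PySem.Dict.items_eq_map_keys d hnd 0]
    exact (PySem.List.sorted_perm d.keys (fun k => k) false).map _
  · rw [List.pairwise_reverse, List.pairwise_map]
    exact sorted_keys_pairwise_lt d hnd

theorem sorted_keys_eq (selC : List (List Int)) :
    PySem.List.sorted (convDist selC).keys (fun k => k) false
      = PySem.List.sorted (countSums selC).keys (fun k => k) false := by
  obtain ⟨_, hndB, hmB⟩ := conv_inv selC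
  apply PySem.List.sorted_eq_sorted_of_perm _ _ _ (fun a b h => h)
  apply (List.perm_ext_iff_of_nodup hndB (nodup_keys_countSums selC)).mpr
  intro v
  rw [hmB v, mem_keys_countSums]

theorem getD_convDist_eq (sel : List (List Int)) (v : Int) :
    (convDist sel).getD v 0 = (countSums sel).getD v 0 := by
  rw [(conv_inv sel).1 v, getD_countSums]

theorem wins_eq (selC selR : List (List Int)) :
    tpOuter (PySem.List.sorted (countSums selC).keys (fun k => k) false)
        (PySem.List.sorted (countSums selR).keys (fun k => k) false)
        (countSums selC) (countSums selR) 0 0 0 0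
      = scanDesc (PySem.List.sorted (convDist selR).items (fun kv => kv.1) true)
          (PySem.List.sorted (convDist selC).items (fun kv => kv.1) true) 0 0 := by
  obtain ⟨_, hndC, _⟩ := conv_inv selC
  obtain ⟨_, hndR, _⟩ := conv_inv selR
  rw [tpOuter_spec _ _ _ _
    (PySem.List.sorted_pairwise (countSums selC).keys (fun k => k))
    (PySem.List.sorted_pairwise (countSums selR).keys (fun k => k))]
  rw [scanDesc_spec _ _ _ _
    (PySem.List.sorted_pairwise_rev (convDist selR).items (fun kv => kv.1))
    (PySem.List.sorted_pairwise_rev (convDist selC).items (fun kv => kv.1))]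
  rw [sorted_items_desc _ hndC, sorted_items_desc _ hndR, sorted_keys_eq selC, sorted_keys_eq selR]
  rw [sum_mul_filter_swap]
  simp only [List.filter_reverse, List.map_reverse, List.sum_reverse, List.filter_map,
    List.map_map, Function.comp_def, zero_add]
  apply congrArg List.sum
  apply List.map_congr_left
  intro t _
  rw [getD_convDist_eq]
  congr 1
  apply congrArg List.sum
  apply List.map_congr_left
  intro k _
  rw [getD_convDist_eq]

theorem rc_eq (N : Int) (c : List Int) :
    remainCmb N c = (PySem.List.pyRange 0 N 1).filter (fun i => !(c.contains i)) := by
  unfold remainCmb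
  simp only []
  have hfun : (fun (remain : List Int) (n : Int) =>
        if PySem.Set.contains (PySem.Set.ofList c) n then remain else remain ++ [n])
      = (fun remain n => if !(PySem.Set.contains (PySem.Set.ofList c) n) then remain ++ [n]
          else remain) := by
    funext remain n
    cases PySem.Set.contains (PySem.Set.ofList c) n <;> simp
  rw [hfun, PySem.List.foldl_append_if (fun n => !(PySem.Set.contains (PySem.Set.ofList c) n))
    (fun n => n)]
  rw [List.nil_append, List.map_id']
  apply List.filter_congr
  intro n _
  congr 1
  have h1 : PySem.Set.contains (PySem.Set.ofList c) n = true ↔ n ∈ c := by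
    rw [PySem.Set.contains_iff]
    exact PySem.Set.mem_ofList c n
  have h2 : c.contains n = true ↔ n ∈ c := List.contains_iff_mem
  rw [Bool.eq_iff_iff, h1, h2]

theorem fold_pair {α : Type} (wA wB : α → Int) (g : α → List Int)
    (hw : ∀ c, wA c = wB c) (l : List α) :
    ∀ (cc mw : Int) (best : List Int),
    (l.foldl (fun (st : Int × Int × List Int) c =>
        if st.2.1 < wA c then (st.1 + 1, wA c, (g c).map (fun x => x + 1))
        else (st.1 + 1, st.2.1, st.2.2)) (cc, mw, best.map (fun x => x + 1))).2
      = ((l.foldl (fun (st : Int × List Int) c =>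
            if st.1 < wB c then (wB c, g c) else (st.1, st.2)) (mw, best)).1,
         (l.foldl (fun (st : Int × List Int) c =>
            if st.1 < wB c then (wB c, g c) else (st.1, st.2)) (mw, best)).2.map
           (fun x => x + 1)) := by
  induction l with
  | nil => intro cc mw best; simp
  | cons c l ih =>
    intro cc mw best
    simp only [List.foldl_cons]
    by_cases h : mw < wB c
    · rw [if_pos (by rw [hw c]; exact h), if_pos h]
      exact ih (cc + 1) (wB c) (g c) ▸ by rw [hw c]
    · rw [if_neg (by rw [hw c]; exact h), if_neg h]
      exact ih (cc + 1) mw best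

theorem main_lemma : ∀ dice, solution dice = solution_alt dice := by
  intro dice
  unfold solution solution_alt
  simp only []
  have hw : ∀ c : List Int,
      tpOuter
          (PySem.List.sorted (countSums (c.map (fun x => PySem.List.pyGetD dice x []))).keys
            (fun k => k) false)
          (PySem.List.sorted (countSums ((remainCmb (dice.length : Int) c).map
            (fun x => PySem.List.pyGetD dice x []))).keys (fun k => k) false)
          (countSums (c.map (fun x => PySem.List.pyGetD dice x [])))
          (countSums ((remainCmb (dice.length : Int) c).map
            (fun x => PySem.List.pyGetD dice x []))) 0 0 0 0
        = scanDesc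
            (PySem.List.sorted (convDist (((PySem.List.pyRange 0 (dice.length : Int) 1).filter
              (fun i => !(c.contains i))).map (fun i => PySem.List.pyGetD dice i []))).items
              (fun kv => kv.1) true)
            (PySem.List.sorted (convDist (c.map (fun i => PySem.List.pyGetD dice i []))).items
              (fun kv => kv.1) true) 0 0 := by
    intro c
    rw [rc_eq]
    exact wins_eq (c.map (fun x => PySem.List.pyGetD dice x []))
      (((PySem.List.pyRange 0 (dice.length : Int) 1).filter (fun i => !(c.contains i))).map
        (fun x => PySem.List.pyGetD dice x []))
  have h := fold_pair _ _ (fun c => c) hw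
    (pyCombinations (dice.length / 2) (PySem.List.pyRange 0 (dice.length : Int) 1)) 0 0 []
  simp only [List.map_nil] at h
  exact congrArg (fun p : Int × List Int => PySem.List.sorted p.2 (fun k : Int => k) false) h

-- ===== VERDICT (by name: the statement is the Claim_ definition above) =====
theorem solution_spec : Claim_equal_solution := by
  intro dice _
  unfold Spec_solution
  exact main_lemma dice
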